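-- pv_equiv track=rewrite | github.com/dreambucket13/AOC2023 | day12/day12.py | ifIFitsISits
-- ===== SOURCE A (Python) =====
-- def ifIFitsISits(conditionRecord, start, damagedSectionlength):
--
--     foundSectionLength = 0
--     index = start
--     char = conditionRecord[index]
--
--     if start + damagedSectionlength > len(conditionRecord):
--         return False
--     elif char not in ('?', '#'):
--         return False
--     elif damagedSectionlength < 1:
--         return False
--
--     sectionEnd = False
--
--     while sectionEnd == False and index < len(conditionRecord):
--         if char == '?':
--
--             if foundSectionLength >= damagedSectionlength:
--                 sectionEnd = True
--                 break
--
--             foundSectionLength += 1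
--             index += 1
--         elif char == '#':
--             foundSectionLength += 1
--             index += 1
--         elif char == '.' or index + 1 >= len(conditionRecord):
--             sectionEnd = True
--
--         if index < len(conditionRecord):
--             char = conditionRecord[index]
--
--     return foundSectionLength == damagedSectionlength
-- ===== SOURCE B (Python) =====
-- def ifIFitsISits(conditionRecord, start, damagedSectionlength):
--     char = conditionRecord[start]
--     n = len(conditionRecord)
--     if start + damagedSectionlength > n:
--         return False
--     if char not in ('?', '#'):
--         return False
--     if damagedSectionlength < 1:
--         return False
--     end = start + damagedSectionlength
--     if not all(conditionRecord[i] in ('?', '#') for i in range(start, end)):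
--         return False
--     return end >= n or conditionRecord[end] != '#'
-- ===== Notes on version B (the rewrite author's own statement) =====
-- stated objective: simpler
-- what changed: A's flag-driven counting while-loop (sectionEnd flag, running foundSectionLength, cached char) is replaced by the same three guards followed by a direct window membership pass over [start, start+length) plus one boundary test on the character after the window.
import Mathlib
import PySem

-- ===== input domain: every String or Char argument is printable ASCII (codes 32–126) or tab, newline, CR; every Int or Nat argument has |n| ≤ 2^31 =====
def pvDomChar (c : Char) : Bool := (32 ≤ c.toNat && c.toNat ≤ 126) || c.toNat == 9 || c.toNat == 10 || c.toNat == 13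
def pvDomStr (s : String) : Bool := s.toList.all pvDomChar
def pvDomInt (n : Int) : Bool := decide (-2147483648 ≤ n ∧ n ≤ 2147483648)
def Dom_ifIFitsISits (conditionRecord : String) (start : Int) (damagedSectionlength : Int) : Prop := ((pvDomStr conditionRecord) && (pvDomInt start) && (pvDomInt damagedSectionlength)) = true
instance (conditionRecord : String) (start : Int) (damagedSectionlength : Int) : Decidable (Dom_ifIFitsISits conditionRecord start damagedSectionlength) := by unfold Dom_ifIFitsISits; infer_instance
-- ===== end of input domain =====

-- B replaces A's flag-driven counting while-loop by the same three guards followed by a window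
-- membership pass plus a single boundary test (objective: simpler).  Python's negative-index
-- wraparound is reproduced faithfully by both ports; Pre_ excludes only the inputs where the
-- Python A raises IndexError or loops forever.

-- ===== PORT A =====
-- conditionRecord[i] as the Python evaluates it (in the loop it is only read in range)
def pvChGet (cs : List Char) (i : Int) : Char := (PySem.List.pyGet? cs i).getD ' '

-- the while-loop of A; `fuel` only makes the (possibly non-terminating) Python loop total,
-- each iteration is a literal transcription of the loop body
def pvLoopA (cs : List Char) (d : Int) : Nat → Int → Int → Char → Bool
  | 0, found, _, _ => found == d
  | fuel+1, found, index, char =>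
    if index < (cs.length : Int) then
      if char = '?' then
        if d ≤ found then found == d                     -- sectionEnd = True; break
        else pvLoopA cs d fuel (found+1) (index+1)
              (if index+1 < (cs.length : Int) then pvChGet cs (index+1) else char)
      else if char = '#' then
        pvLoopA cs d fuel (found+1) (index+1)
              (if index+1 < (cs.length : Int) then pvChGet cs (index+1) else char)
      else if char = '.' ∨ (cs.length : Int) ≤ index + 1 then found == d   -- sectionEnd = True
      else pvLoopA cs d fuel found index char            -- no branch fires: Python loops forever
    else found == d

def ifIFitsISits (conditionRecord : String) (start : Int) (damagedSectionlength : Int) : Bool :=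
  let cs := conditionRecord.toList
  match PySem.List.pyGet? cs start with
  | none => false                                        -- IndexError (outside Pre_)
  | some char =>
    if (cs.length : Int) < start + damagedSectionlength then false
    else if ¬(char = '?' ∨ char = '#') then false
    else if damagedSectionlength < 1 then false
    else pvLoopA cs damagedSectionlength (2 * cs.length + 2) 0 start char

-- ===== PORT B =====
-- the window pass and boundary test of Source B
def pvWindowB (cs : List Char) (s d : Int) : Bool :=
  ((PySem.List.pyRange s (s+d)).all
      (fun i => (pvChGet cs i == '?') || (pvChGet cs i == '#')))
  && (decide ((cs.length : Int) ≤ s + d) || (pvChGet cs (s+d) != '#'))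

def ifIFitsISits_alt (conditionRecord : String) (start : Int) (damagedSectionlength : Int) : Bool :=
  let cs := conditionRecord.toList
  match PySem.List.pyGet? cs start with
  | none => false                                        -- IndexError (outside Pre_)
  | some char =>
    if (cs.length : Int) < start + damagedSectionlength then false
    else if ¬(char = '?' ∨ char = '#') then false
    else if damagedSectionlength < 1 then false
    else pvWindowB cs start damagedSectionlength

-- ===== PRECONDITION & SPEC =====
-- Pre_ excludes exactly the inputs where the Python A does not return: start out of Python's
-- index range (IndexError on the first line), and the inputs where the scan, after the three
-- guards pass, reaches a character outside '.#?' before position len-1 (there A's loop body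
-- fires no branch and loops forever).
def Pre_ifIFitsISits (conditionRecord : String) (start : Int) (damagedSectionlength : Int) : Prop :=
  PySem.Raise.InRange conditionRecord.toList.length start ∧
  (start + damagedSectionlength ≤ (conditionRecord.toList.length : Int) →
   1 ≤ damagedSectionlength →
   (pvChGet conditionRecord.toList start = '?' ∨ pvChGet conditionRecord.toList start = '#') →
   ∀ k : ℕ, k < ((conditionRecord.toList.length : Int) - start).toNat →
     (∀ j : ℕ, j < k →
        (pvChGet conditionRecord.toList (start + (j:Int)) = '#' ∨
         (pvChGet conditionRecord.toList (start + (j:Int)) = '?' ∧ (j:Int) < damagedSectionlength))) →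
     (pvChGet conditionRecord.toList (start + (k:Int)) ≠ '?' ∧
      pvChGet conditionRecord.toList (start + (k:Int)) ≠ '#' ∧
      pvChGet conditionRecord.toList (start + (k:Int)) ≠ '.') →
     (conditionRecord.toList.length : Int) ≤ start + (k:Int) + 1)
instance (conditionRecord : String) (start : Int) (damagedSectionlength : Int) : Decidable (Pre_ifIFitsISits conditionRecord start damagedSectionlength) := by unfold Pre_ifIFitsISits; infer_instance

def pvWitness_ifIFitsISits : String × Int × Int := ("#?#", 0, 2)

def Spec_ifIFitsISits (conditionRecord : String) (start : Int) (damagedSectionlength : Int) (out : Bool) : Prop := out = ifIFitsISits_alt conditionRecord start damagedSectionlength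
instance (conditionRecord : String) (start : Int) (damagedSectionlength : Int) (out : Bool) : Decidable (Spec_ifIFitsISits conditionRecord start damagedSectionlength out) := by unfold Spec_ifIFitsISits; infer_instance

-- ===== CLAIM (what is proved, stated in full; the proofs are below) =====
def Claim_equal_ifIFitsISits : Prop := ∀ (conditionRecord : String) (start : Int) (damagedSectionlength : Int), Dom_ifIFitsISits conditionRecord start damagedSectionlength → Pre_ifIFitsISits conditionRecord start damagedSectionlength → Spec_ifIFitsISits conditionRecord start damagedSectionlength (ifIFitsISits conditionRecord start damagedSectionlength)

-- ===== LEMMAS AND PROOFS =====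

-- the window pass is true when positions start..start+d-1 all carry '#' or in-window '?'
theorem pv_all_true (cs : List Char) (s d : Int) (k : ℕ)
    (hdk : d ≤ (k:Int))
    (hgood : ∀ j : ℕ, j < k →
        (pvChGet cs (s + (j:Int)) = '#' ∨ (pvChGet cs (s + (j:Int)) = '?' ∧ (j:Int) < d))) :
    (PySem.List.pyRange s (s+d)).all
      (fun i => (pvChGet cs i == '?') || (pvChGet cs i == '#')) = true := by
  rw [List.all_eq_true]
  intro i hi
  rw [PySem.List.mem_pyRange_one] at hi
  have hj : ((i - s).toNat : Int) = i - s := Int.toNat_of_nonneg (by omega)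
  have hjk : (i - s).toNat < k := by omega
  rcases hgood _ hjk with h | ⟨h, _⟩ <;>
    · rw [hj] at h; simp only [show s + (i - s) = i by ring] at h; simp [h]

-- value of the window+boundary test when A's scan has stopped with count k ≥ d
theorem pv_stop_eval (cs : List Char) (s d : Int) (k : ℕ)
    (hd : 1 ≤ d) (hk : s + (k:Int) ≤ (cs.length : Int)) (hdk : d ≤ (k:Int))
    (hgood : ∀ j : ℕ, j < k →
        (pvChGet cs (s + (j:Int)) = '#' ∨ (pvChGet cs (s + (j:Int)) = '?' ∧ (j:Int) < d)))
    (hstop : (cs.length : Int) ≤ s + (k:Int) ∨ pvChGet cs (s + (k:Int)) ≠ '#') :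
    pvWindowB cs s d = decide ((k:Int) = d) := by
  have hall := pv_all_true cs s d k hdk hgood
  by_cases hkd : (k:Int) = d
  · -- count is exactly d: window good, boundary good ⇒ true
    rw [pvWindowB, hall, Bool.true_and, decide_eq_true hkd]
    by_cases hb : (cs.length : Int) ≤ s + d
    · simp [hb]
    · have hne : pvChGet cs (s + d) ≠ '#' := by
        rcases hstop with h | h
        · omega
        · rwa [hkd] at h
      simp [hb, hne]
  · -- count overshot d: the character at s+d must be '#', boundary fails ⇒ false
    have hlt : d < (k:Int) := lt_of_le_of_ne hdk (Ne.symm hkd)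
    have hdnat : ((d.toNat : Int)) = d := Int.toNat_of_nonneg (by omega)
    have hjk : d.toNat < k := by omega
    have hsharp : pvChGet cs (s + d) = '#' := by
      rcases hgood d.toNat hjk with h | ⟨_, h2⟩
      · rwa [hdnat] at h
      · rw [hdnat] at h2; omega
    have hb : ¬ ((cs.length : Int) ≤ s + d) := by omega
    rw [pvWindowB]
    simp [hsharp, hb, hkd]

-- value of the window+boundary test when A's scan has stopped with count k < d
theorem pv_window_false (cs : List Char) (s d : Int) (k : ℕ)
    (hkd : (k:Int) < d)
    (hch : pvChGet cs (s + (k:Int)) ≠ '?' ∧ pvChGet cs (s + (k:Int)) ≠ '#') :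
    pvWindowB cs s d = false := by
  rw [pvWindowB]
  have : (PySem.List.pyRange s (s+d)).all
      (fun i => (pvChGet cs i == '?') || (pvChGet cs i == '#')) = false := by
    rw [Bool.eq_false_iff]
    intro hall
    rw [List.all_eq_true] at hall
    have hmem : s + (k:Int) ∈ PySem.List.pyRange s (s+d) := by
      rw [PySem.List.mem_pyRange_one]; omega
    have := hall _ hmem
    simp only [Bool.or_eq_true, beq_iff_eq] at this
    tauto
  rw [this, Bool.false_and]

-- A's loop, started in a reachable state, computes exactly B's window+boundary test
theorem pvLoop_eq (cs : List Char) (s d : Int)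
    (hs1 : s < (cs.length : Int)) (hd : 1 ≤ d) (hsd : s + d ≤ (cs.length : Int))
    (hns : ∀ k : ℕ, k < ((cs.length : Int) - s).toNat →
      (∀ j : ℕ, j < k →
        (pvChGet cs (s + (j:Int)) = '#' ∨ (pvChGet cs (s + (j:Int)) = '?' ∧ (j:Int) < d))) →
      (pvChGet cs (s + (k:Int)) ≠ '?' ∧ pvChGet cs (s + (k:Int)) ≠ '#' ∧
       pvChGet cs (s + (k:Int)) ≠ '.') →
      (cs.length : Int) ≤ s + (k:Int) + 1) :
    ∀ (fuel k : ℕ) (c : Char),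
      s + (k:Int) ≤ (cs.length : Int) →
      (∀ j : ℕ, j < k →
        (pvChGet cs (s + (j:Int)) = '#' ∨ (pvChGet cs (s + (j:Int)) = '?' ∧ (j:Int) < d))) →
      (s + (k:Int) < (cs.length : Int) → c = pvChGet cs (s + (k:Int))) →
      ((cs.length : Int) - s).toNat - k < fuel →
      pvLoopA cs d fuel (k:Int) (s + (k:Int)) c = pvWindowB cs s d := by
  intro fuel
  induction fuel with
  | zero => intro k c _ _ _ hfuel; omega
  | succ fuel ih =>
    intro k c hk hgood hc hfuel
    by_cases hlt : s + (k:Int) < (cs.length : Int)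
    · have hcc := hc hlt
      rw [pvLoopA, if_pos hlt]
      have hgood' : ∀ (good : pvChGet cs (s + (k:Int)) = '#' ∨
            (pvChGet cs (s + (k:Int)) = '?' ∧ (k:Int) < d)),
          ∀ j : ℕ, j < k + 1 →
            (pvChGet cs (s + (j:Int)) = '#' ∨
             (pvChGet cs (s + (j:Int)) = '?' ∧ (j:Int) < d)) := by
        intro good j hj
        rcases Nat.lt_succ_iff_lt_or_eq.mp hj with h | h
        · exact hgood j h
        · subst h; exact good
      have hstep : ∀ (good : pvChGet cs (s + (k:Int)) = '#' ∨
            (pvChGet cs (s + (k:Int)) = '?' ∧ (k:Int) < d)),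
          pvLoopA cs d fuel ((k:Int)+1) (s + (k:Int) + 1)
            (if s + (k:Int) + 1 < (cs.length : Int) then pvChGet cs (s + (k:Int) + 1) else c)
            = pvWindowB cs s d := by
        intro good
        have h1 : ((k+1 : ℕ) : Int) = (k:Int) + 1 := by push_cast; ring
        have := ih (k+1)
          (if s + (k:Int) + 1 < (cs.length : Int) then pvChGet cs (s + (k:Int) + 1) else c)
          (by omega) (hgood' good)
          (by intro h
              have h' : s + (k:Int) + 1 < (cs.length : Int) := by push_cast at h ⊢; omega
              rw [if_pos h']
              push_cast
              ring_nf) (by omega)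
        simpa [h1, add_assoc] using this
      by_cases hq : c = '?'
      · rw [if_pos hq]
        by_cases hdk : d ≤ (k:Int)
        · rw [if_pos hdk]
          rw [show (((k:Int)) == d) = decide ((k:Int) = d) from rfl]
          exact (pv_stop_eval cs s d k hd hk hdk hgood (Or.inr (by rw [← hcc, hq]; decide))).symm
        · rw [if_neg hdk]
          exact hstep (Or.inr ⟨by rw [← hcc]; exact hq, by omega⟩)
      · rw [if_neg hq]
        by_cases hh : c = '#'
        · rw [if_pos hh]
          exact hstep (Or.inl (by rw [← hcc]; exact hh))
        · rw [if_neg hh]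
          by_cases hdot : c = '.' ∨ (cs.length : Int) ≤ s + (k:Int) + 1
          · rw [if_pos hdot]
            by_cases hdk : d ≤ (k:Int)
            · rw [show (((k:Int)) == d) = decide ((k:Int) = d) from rfl]
              exact (pv_stop_eval cs s d k hd hk hdk hgood
                (Or.inr (by rw [← hcc]; exact hh))).symm
            · -- count still short of d: the window test fails at this position
              rw [pv_window_false cs s d k (by omega) ⟨by rw [← hcc]; exact hq, by rw [← hcc]; exact hh⟩]
              rw [show (((k:Int)) == d) = decide ((k:Int) = d) from rfl]
              simp only [decide_eq_false_iff_not]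
              omega
          · -- no branch fires: Pre_ rules this state out
            exfalso
            push_neg at hdot
            have := hns k (by omega) hgood
              ⟨by rw [← hcc]; exact hq, by rw [← hcc]; exact hh, by rw [← hcc]; exact hdot.1⟩
            omega
    · -- index = len: loop exits with found = k
      have hkn : s + (k:Int) = (cs.length : Int) := by omega
      rw [pvLoopA, if_neg hlt]
      have hdk : d ≤ (k:Int) := by omega
      rw [show (((k:Int)) == d) = decide ((k:Int) = d) from rfl]
      exact (pv_stop_eval cs s d k hd hk hdk hgood (Or.inl (by omega))).symm

-- ===== VERDICT (by name: the statement is the Claim_ definition above) =====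
theorem ifIFitsISits_spec : Claim_equal_ifIFitsISits := by
  unfold Claim_equal_ifIFitsISits
  intro cr s d _ hpre
  unfold Spec_ifIFitsISits ifIFitsISits ifIFitsISits_alt
  obtain ⟨hin, hns⟩ := hpre
  obtain ⟨hs0, hs1⟩ := hin
  have hsome : ∃ c, PySem.List.pyGet? cr.toList s = some c := by
    cases h : PySem.List.pyGet? cr.toList s with
    | none => rw [PySem.List.pyGet?_eq_none_iff] at h
              exact absurd ⟨hs0, hs1⟩ h
    | some c => exact ⟨c, rfl⟩
  obtain ⟨c, hc⟩ := hsome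
  simp only [hc]
  by_cases hg1 : (cr.toList.length : Int) < s + d
  · rw [if_pos hg1, if_pos hg1]
  · rw [if_neg hg1, if_neg hg1]
    by_cases hg2 : ¬(c = '?' ∨ c = '#')
    · rw [if_pos hg2, if_pos hg2]
    · rw [if_neg hg2, if_neg hg2]
      by_cases hg3 : d < 1
      · rw [if_pos hg3, if_pos hg3]
      · rw [if_neg hg3, if_neg hg3]
        push_neg at hg2 hg3 hg1
        have hch : pvChGet cr.toList s = c := by rw [pvChGet, hc]; rfl
        have hns' := hns hg1 hg3 (by rw [hch]; exact hg2)
        have := pvLoop_eq cr.toList s d hs1 hg3 hg1 hns'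
          (2 * cr.toList.length + 2) 0 c (by omega)
          (by intro j hj; omega)
          (by intro _
              simp only [Nat.cast_zero, add_zero]
              exact hch.symm) (by omega)
        simpa using this
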